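-- pv_equiv track=rewrite | github.com/DARRENSKY/COMP9021 | assignment/assignment_1/pivoting_die.py | front
-- ===== SOURCE A (Python) =====
-- def front(t, n):
--     for i in range(n):
--         a = t[:]
--         a[0] = t[5]
--         a[2] = t[4]
--         a[4] = t[0]
--         a[5] = t[2]
--         t = a[:]
--     return t[:]
-- ===== SOURCE B (Python) =====
-- def front(t, n):
--     # O(1): the pivot is a 4-cycle on positions (0 5 2 4); apply the (n % 4)-th
--     # power of the permutation once, via a precomputed source-index table.
--     if n <= 0:
--         return t[:]
--     i0, i2, i4, i5 = [(0, 2, 4, 5), (5, 4, 0, 2), (2, 0, 5, 4), (4, 5, 2, 0)][n % 4]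
--     a = t[:]
--     a[0], a[2], a[4], a[5] = t[i0], t[i2], t[i4], t[i5]
--     return a
-- ===== Notes on version B (the rewrite author's own statement) =====
-- stated objective: faster
-- what changed: B replaces A's n-iteration pivot loop by a single table-driven application of the (n % 4)-th power of the 4-cycle permutation on positions (0 5 2 4), since the pivot has period 4.
import Mathlib
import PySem

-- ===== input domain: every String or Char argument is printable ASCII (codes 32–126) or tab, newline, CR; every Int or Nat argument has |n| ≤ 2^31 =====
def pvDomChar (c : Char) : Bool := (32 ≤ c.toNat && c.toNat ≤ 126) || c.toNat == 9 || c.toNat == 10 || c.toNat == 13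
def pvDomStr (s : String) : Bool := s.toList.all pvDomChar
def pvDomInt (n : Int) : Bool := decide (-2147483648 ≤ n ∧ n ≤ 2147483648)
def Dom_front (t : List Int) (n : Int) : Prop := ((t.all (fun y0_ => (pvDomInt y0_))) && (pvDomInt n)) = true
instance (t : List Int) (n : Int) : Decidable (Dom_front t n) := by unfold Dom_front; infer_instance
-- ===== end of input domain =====

-- B replaces A's n-step pivot loop by one table-driven application of the
-- (n % 4)-th power of the 4-cycle permutation: O(1) instead of O(n).

-- ===== PORT A =====
-- loop body of A: a = t[:]; a[0]=t[5]; a[2]=t[4]; a[4]=t[0]; a[5]=t[2]; t = a[:]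
def frontStep (t : List Int) : List Int :=
  let a := t
  let a := PySem.List.pySetD a 0 (PySem.List.pyGetD t 5 0)
  let a := PySem.List.pySetD a 2 (PySem.List.pyGetD t 4 0)
  let a := PySem.List.pySetD a 4 (PySem.List.pyGetD t 0 0)
  let a := PySem.List.pySetD a 5 (PySem.List.pyGetD t 2 0)
  a

def front (t : List Int) (n : Int) : List Int :=
  (PySem.List.pyRange 0 n 1).foldl (fun t _ => frontStep t) t

-- ===== PORT B =====
def front_alt (t : List Int) (n : Int) : List Int :=
  if n ≤ 0 then t
  else
    let src : List (Int × Int × Int × Int) :=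
      [(0, 2, 4, 5), (5, 4, 0, 2), (2, 0, 5, 4), (4, 5, 2, 0)]
    let s := PySem.List.pyGetD src (PySem.Int.mod n 4) (0, 2, 4, 5)
    let a := t
    let a := PySem.List.pySetD a 0 (PySem.List.pyGetD t s.1 0)
    let a := PySem.List.pySetD a 2 (PySem.List.pyGetD t s.2.1 0)
    let a := PySem.List.pySetD a 4 (PySem.List.pyGetD t s.2.2.1 0)
    let a := PySem.List.pySetD a 5 (PySem.List.pyGetD t s.2.2.2 0)
    a

-- ===== PRECONDITION & SPEC =====
-- A raises IndexError (t[5]) as soon as the loop runs on a list shorter than 6;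
-- with n ≤ 0 the loop never runs and any list is fine.
def Pre_front (t : List Int) (n : Int) : Prop := n ≤ 0 ∨ 6 ≤ t.length
instance (t : List Int) (n : Int) : Decidable (Pre_front t n) := by
  unfold Pre_front; infer_instance

def pvWitness_front : List Int × Int := ([1, 2, 3, 4, 5, 6], 3)

def Spec_front (t : List Int) (n : Int) (out : List Int) : Prop := out = front_alt t n
instance (t : List Int) (n : Int) (out : List Int) : Decidable (Spec_front t n out) := by
  unfold Spec_front; infer_instance

-- ===== CLAIM (what is proved, stated in full; the proofs are below) =====
def Claim_equal_front : Prop :=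
  ∀ (t : List Int) (n : Int), Dom_front t n → Pre_front t n → Spec_front t n (front t n)

-- ===== LEMMAS AND PROOFS =====

theorem foldl_step_eq_iterate (l : List Int) (t : List Int) :
    l.foldl (fun t _ => frontStep t) t = frontStep^[l.length] t := by
  induction l generalizing t with
  | nil => rfl
  | cons x xs ih => simp [List.foldl_cons, ih, Function.iterate_succ_apply]

theorem frontStep_cons6 (a b c d e f : Int) (r : List Int) :
    frontStep (a :: b :: c :: d :: e :: f :: r) = f :: b :: e :: d :: a :: c :: r := by
  simp [frontStep, pysem]

theorem frontStep_period (a b c d e f : Int) (r : List Int) :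
    frontStep^[4] (a :: b :: c :: d :: e :: f :: r) = a :: b :: c :: d :: e :: f :: r := by
  simp [Function.iterate_succ_apply, frontStep_cons6]

theorem iterate_mod4 (m : Nat) (a b c d e f : Int) (r : List Int) :
    frontStep^[m] (a :: b :: c :: d :: e :: f :: r)
      = frontStep^[m % 4] (a :: b :: c :: d :: e :: f :: r) := by
  induction m using Nat.strong_induction_on with
  | _ m ih =>
    by_cases h : m < 4
    · rw [Nat.mod_eq_of_lt h]
    · have hm : m = (m - 4) + 4 := by omega
      rw [hm, Function.iterate_add_apply, frontStep_period, ih (m - 4) (by omega)]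
      congr 1
      omega

-- ===== VERDICT (by name: the statement is the Claim_ definition above) =====
set_option maxHeartbeats 1000000 in
theorem front_spec : Claim_equal_front := by
  intro t n _ hPre
  unfold Spec_front
  by_cases hn : n ≤ 0
  · rw [front, PySem.List.pyRange_one_eq_nil hn, front_alt, if_pos hn]
    rfl
  · have hlen : 6 ≤ t.length := by
      rcases hPre with h | h
      · omega
      · exact h
    match t, hlen with
    | a :: b :: c :: d :: e :: f :: r, _ =>
      rw [front, foldl_step_eq_iterate, PySem.List.length_pyRange_one, iterate_mod4]
      have hmod : PySem.Int.mod n 4 = (((n - 0).toNat % 4 : Nat) : Int) := by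
        simp [PySem.Int.mod, Int.fmod_eq_emod]
        omega
      have h4 : (n - 0).toNat % 4 = 0 ∨ (n - 0).toNat % 4 = 1 ∨
          (n - 0).toNat % 4 = 2 ∨ (n - 0).toNat % 4 = 3 := by omega
      rcases h4 with h | h | h | h <;>
        rw [h] at hmod ⊢ <;>
        rw [front_alt, if_neg hn, hmod] <;>
        simp [Function.iterate_succ_apply, frontStep_cons6, pysem]
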